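-- pv_equiv track=rewrite | github.com/vilinicz/bioinformatics | replication.py | SymbolArray
-- ===== SOURCE A (Python) =====
-- def SymbolArray(Genome, symbol):
--     array = {}
--     n = len(Genome)
--     ExtendedGenome = Genome + Genome[0:n // 2]
--
--     # look at the first half of Genome to compute first array value
--     array[0] = Genome[0:n // 2].count(symbol)
--
--     for i in range(1, n):
--         # start by setting the current array value equal to the previous array value
--         array[i] = array[i - 1]
--         # the current array value can differ from the previous array value by at most 1
--         if ExtendedGenome[i - 1] == symbol:
--             array[i] = array[i] - 1
--         if ExtendedGenome[i + (n // 2) - 1] == symbol: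
--             array[i] = array[i] + 1
--     return array
-- ===== SOURCE B (Python) =====
-- def SymbolArray(Genome, symbol):
--     n = len(Genome)
--     h = n // 2
--     # prefix[j] = number of positions < j in the extended genome holding exactly `symbol`
--     prefix = [0]
--     for c in Genome + Genome[:h]:
--         prefix.append(prefix[-1] + (c == symbol))
--     array = {0: Genome[:h].count(symbol)}
--     for i in range(1, n):
--         array[i] = array[0] + prefix[i + h] - prefix[h] - prefix[i]
--     return array
-- ===== Notes on version B (the rewrite author's own statement) =====
-- stated objective: alternative
-- what changed: B replaces A's loop-carried running count (adjusting the previous dict value by the two window-boundary characters) with a prefix-sum table over the extended genome, computing every array value independently by a closed formula prefix[i+n//2]-prefix[i].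
import Mathlib
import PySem

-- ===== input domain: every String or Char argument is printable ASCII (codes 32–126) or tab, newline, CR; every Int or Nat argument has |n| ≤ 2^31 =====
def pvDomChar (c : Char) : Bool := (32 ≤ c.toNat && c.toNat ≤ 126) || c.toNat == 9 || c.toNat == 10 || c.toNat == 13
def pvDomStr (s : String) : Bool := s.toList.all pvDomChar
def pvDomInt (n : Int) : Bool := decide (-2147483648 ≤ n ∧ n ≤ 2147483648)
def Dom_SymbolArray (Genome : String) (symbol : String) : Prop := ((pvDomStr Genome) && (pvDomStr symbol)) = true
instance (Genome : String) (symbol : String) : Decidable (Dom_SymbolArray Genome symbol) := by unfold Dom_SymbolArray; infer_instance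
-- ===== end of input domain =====

-- B replaces A's loop-carried running count by a prefix-sum table read by a direct
-- per-index formula (objective: alternative decomposition, same O(n) cost).

-- ===== PORT A =====
-- literal transliteration of A: dict, array[0] set unconditionally, then the
-- incremental loop over range(1, n) adjusting by the two boundary characters.
def SymbolArray (Genome : String) (symbol : String) : List (Int × Int) :=
  let n : Int := PySem.Str.len Genome
  let g : List Char := Genome.toList
  let ext : List Char := g ++ PySem.List.slice g (some 0) (some (PySem.Int.floordiv n 2))
  let d0 : PySem.Dict Int Int :=
    PySem.Dict.empty.insert 0
      ((PySem.Chars.count (PySem.List.slice g (some 0) (some (PySem.Int.floordiv n 2))) symbol.toList : Nat) : Int)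
  -- ext[j] is a single char; Python compares the 1-char string with `symbol`,
  -- which holds iff symbol.toList = [that char]  (indices are always in range here)
  let d := (PySem.List.pyRange 1 n 1).foldl (fun d i =>
    let d := d.insert i (d.getD (i - 1) 0)
    let d := if [PySem.List.pyGetD ext (i - 1) ' '] == symbol.toList
             then d.insert i (d.getD i 0 - 1) else d
    let d := if [PySem.List.pyGetD ext (i + PySem.Int.floordiv n 2 - 1) ' '] == symbol.toList
             then d.insert i (d.getD i 0 + 1) else d
    d) d0
  d.items

-- ===== PORT B =====
-- literal transliteration of Source B: build the prefix-count table by appending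
-- prefix[-1] + (c == symbol), then each array[i] is a closed formula in it.
def SymbolArray_alt (Genome : String) (symbol : String) : List (Int × Int) :=
  let n : Int := PySem.Str.len Genome
  let h : Int := PySem.Int.floordiv n 2
  let g : List Char := Genome.toList
  let pre : List Int := (g ++ PySem.List.slice g none (some h)).foldl
      (fun p c => p ++ [PySem.List.pyGetD p (-1) 0 + (if [c] == symbol.toList then 1 else 0)]) [0]
  let d0 : PySem.Dict Int Int :=
    PySem.Dict.empty.insert 0 ((PySem.Chars.count (PySem.List.slice g none (some h)) symbol.toList : Nat) : Int)
  ((PySem.List.pyRange 1 n 1).foldl (fun d i =>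
      d.insert i (d.getD 0 0 + PySem.List.pyGetD pre (i + h) 0
                  - PySem.List.pyGetD pre h 0 - PySem.List.pyGetD pre i 0)) d0).items

-- ===== PRECONDITION & SPEC =====
def Spec_SymbolArray (Genome : String) (symbol : String) (out : List (Int × Int)) : Prop := out = SymbolArray_alt Genome symbol
instance (Genome : String) (symbol : String) (out : List (Int × Int)) : Decidable (Spec_SymbolArray Genome symbol out) := by unfold Spec_SymbolArray; infer_instance

-- ===== CLAIM (what is proved, stated in full; the proofs are below) =====
def Claim_equal_SymbolArray : Prop := ∀ (Genome : String) (symbol : String), Dom_SymbolArray Genome symbol → Spec_SymbolArray Genome symbol (SymbolArray Genome symbol)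

-- ===== LEMMAS AND PROOFS =====

def pvPred (symbol : String) (c : Char) : Bool := [c] == symbol.toList
def pvExt (g : List Char) : List Char := g ++ g.take (g.length / 2)
def pvS (g : List Char) (symbol : String) (k : Nat) : Int :=
  (((pvExt g).take k).countP (pvPred symbol) : Int)
def pvV (g : List Char) (symbol : String) (k : Nat) : Int :=
  ((PySem.Chars.count (g.take (g.length / 2)) symbol.toList : Nat) : Int)
    + pvS g symbol (k + g.length / 2) - pvS g symbol (g.length / 2) - pvS g symbol k
def pvL (g : List Char) (symbol : String) (m : Nat) : List (Int × Int) :=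
  (List.range m).map (fun (k : Nat) => ((k : Int), pvV g symbol k))

lemma pv_keys_L (g : List Char) (symbol : String) (m : Nat) :
    (PySem.Dict.mk (pvL g symbol m)).keys = (List.range m).map (fun (k : Nat) => ((k : Nat) : Int)) := by
  rw [PySem.Dict.keys_mk, pvL, List.map_map]
  rfl


lemma pv_nodup_keys_L' (g : List Char) (symbol : String) (m : Nat) :
    (PySem.Dict.mk (pvL g symbol m)).keys.Nodup := by
  rw [pv_keys_L]
  exact List.nodup_range.map (fun a b h => by exact_mod_cast h)

lemma pv_not_contains_L (g : List Char) (symbol : String) (m j : Nat) (hj : m ≤ j) :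
    (PySem.Dict.mk (pvL g symbol m)).contains ((j : Nat) : Int) = false := by
  rw [PySem.Dict.contains_mk]
  rw [List.any_eq_false]
  rintro ⟨a, b⟩ hab
  rw [pvL, List.mem_map] at hab
  obtain ⟨k, hk, he⟩ := hab
  rw [List.mem_range] at hk
  have h1 : a = (k : Int) := by cases he; rfl
  subst h1
  simp only [beq_iff_eq, Int.natCast_inj]
  omega

lemma pv_getD_L (g : List Char) (symbol : String) (m k : Nat) (hk : k < m) :
    (PySem.Dict.mk (pvL g symbol m)).getD ((k : Nat) : Int) 0 = pvV g symbol k := by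
  refine PySem.Dict.getD_of_mem_items _ ?_ (pv_nodup_keys_L' g symbol m) 0
  rw [pvL, List.mem_map]
  exact ⟨k, List.mem_range.mpr hk, rfl⟩

lemma pv_S_succ (g : List Char) (symbol : String) (k : Nat) (hk : k < (pvExt g).length) :
    pvS g symbol (k + 1) = pvS g symbol k + (if pvPred symbol ((pvExt g).getD k ' ') then 1 else 0) := by
  rw [pvS, pvS, List.take_add_one, List.countP_append, List.getElem?_eq_getElem hk]
  rw [List.getD, List.getElem?_eq_getElem hk]
  simp [List.countP_cons]

lemma pv_prefix_spec (symbol : String) (e : List Char) :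
    e.foldl (fun p c => p ++ [PySem.List.pyGetD p (-1) 0 + (if [c] == symbol.toList then 1 else 0)]) [0]
      = (List.range (e.length + 1)).map (fun k => ((e.take k).countP (pvPred symbol) : Int)) := by
  induction e using List.reverseRecOn with
  | nil => simp
  | append_singleton e c ih =>
    rw [List.foldl_append, ih]
    rw [List.foldl_cons, List.foldl_nil]
    have hne : (List.range (e.length + 1)).map (fun k => (((e.take k).countP (pvPred symbol) : Nat) : Int)) ≠ [] := by
      simp
    rw [PySem.List.pyGetD_neg_one _ _ hne]
    rw [List.getLast_eq_getElem]
    simp only [List.length_map, List.length_range]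
    rw [List.getElem_map]
    rw [List.length_append, List.length_singleton, List.range_succ (n := e.length + 1), List.map_append, List.map_singleton]
    congr 1
    · apply List.map_congr_left
      intro k hk
      rw [List.mem_range] at hk
      congr 1
      rw [List.take_append_of_le_length (by omega)]
    · congr 1
      rw [List.getElem_range]
      have h1 : e.length + 1 - 1 = e.length := by omega
      rw [h1, List.take_length, List.take_of_length_le (by simp), List.countP_append]
      simp [pvPred, List.countP_cons]


lemma pv_len_ext (g : List Char) : (pvExt g).length = g.length + g.length / 2 := by
  simp [pvExt, List.length_take]; omega

lemma pv_pre_getD (g : List Char) (symbol : String) (k : Nat) (hk : k ≤ (pvExt g).length) :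
    PySem.List.pyGetD ((g ++ g.take (g.length / 2)).foldl
      (fun p c => p ++ [PySem.List.pyGetD p (-1) 0 + (if [c] == symbol.toList then 1 else 0)]) [0]) ((k : Nat) : Int) 0
      = pvS g symbol k := by
  have : g ++ g.take (g.length / 2) = pvExt g := rfl
  rw [this, pv_prefix_spec, PySem.List.pyGetD_natCast, PySem.List.getD_map_range _ _ _ _ (by omega)]
  rfl

lemma pv_mk_insert_fresh (g : List Char) (symbol : String) (m : Nat) (v : Int) :
    (PySem.Dict.mk (pvL g symbol m)).insert ((m : Nat) : Int) v
      = PySem.Dict.mk (pvL g symbol m ++ [(((m : Nat) : Int), v)]) := by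
  apply PySem.Dict.ext
  rw [PySem.Dict.items_insert_of_not_contains _ _ (pv_not_contains_L g symbol m m le_rfl)]

lemma pv_V_succ (g : List Char) (symbol : String) (k : Nat) (hk : k < g.length) :
    pvV g symbol (k + 1)
      = pvV g symbol k
        - (if pvPred symbol ((pvExt g).getD k ' ') then 1 else 0)
        + (if pvPred symbol ((pvExt g).getD (k + g.length / 2) ' ') then 1 else 0) := by
  have h1 := pv_S_succ g symbol k (by rw [pv_len_ext]; omega)
  have h2 := pv_S_succ g symbol (k + g.length / 2) (by rw [pv_len_ext]; omega)
  have h3 : k + 1 + g.length / 2 = k + g.length / 2 + 1 := by omega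
  rw [pvV, pvV, h3, h2, h1]
  ring

lemma pv_foldB (g : List Char) (symbol : String) (m : Nat) (hm : 1 ≤ m) (hn : m ≤ g.length) :
    (PySem.List.pyRange 1 ((m : Nat) : Int) 1).foldl (fun d i =>
      d.insert i (d.getD 0 0
        + PySem.List.pyGetD ((g ++ g.take (g.length / 2)).foldl
            (fun p c => p ++ [PySem.List.pyGetD p (-1) 0 + (if [c] == symbol.toList then 1 else 0)]) [0]) (i + ((g.length / 2 : Nat) : Int)) 0
        - PySem.List.pyGetD ((g ++ g.take (g.length / 2)).foldl
            (fun p c => p ++ [PySem.List.pyGetD p (-1) 0 + (if [c] == symbol.toList then 1 else 0)]) [0]) ((g.length / 2 : Nat) : Int) 0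
        - PySem.List.pyGetD ((g ++ g.take (g.length / 2)).foldl
            (fun p c => p ++ [PySem.List.pyGetD p (-1) 0 + (if [c] == symbol.toList then 1 else 0)]) [0]) i 0))
      (PySem.Dict.empty.insert 0 ((PySem.Chars.count (g.take (g.length / 2)) symbol.toList : Nat) : Int))
    = PySem.Dict.mk (pvL g symbol m) := by
  induction m, hm using Nat.le_induction with
  | base =>
    rw [show ((1 : Nat) : Int) = (1 : Int) by norm_num, PySem.List.pyRange_one_eq_nil le_rfl]
    rw [List.foldl_nil]
    apply PySem.Dict.ext
    rw [PySem.Dict.items_insert_of_not_contains _ _ (by simp)]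
    simp [pvL, pvV, pvS, PySem.Dict.empty]
  | succ m hm ih =>
    have hmn : m ≤ g.length := by omega
    have hcast : ((m + 1 : Nat) : Int) = ((m : Nat) : Int) + 1 := by push_cast; ring
    rw [hcast, PySem.List.pyRange_one_succ_right (by exact_mod_cast hm), List.foldl_append, ih hmn]
    rw [List.foldl_cons, List.foldl_nil]
    -- the three table reads
    have e1 : ((m : Nat) : Int) + ((g.length / 2 : Nat) : Int) = ((m + g.length / 2 : Nat) : Int) := by push_cast; ring
    rw [e1, pv_pre_getD g symbol (m + g.length / 2) (by rw [pv_len_ext]; omega),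
        pv_pre_getD g symbol (g.length / 2) (by rw [pv_len_ext]; omega),
        pv_pre_getD g symbol m (by rw [pv_len_ext]; omega)]
    have e0 := pv_getD_L g symbol m 0 (by omega)
    rw [Nat.cast_zero] at e0
    rw [e0]
    rw [pv_mk_insert_fresh]
    congr 1
    rw [pvL, pvL, List.range_succ, List.map_append, List.map_singleton]
    congr 2
    rw [pvV, pvV, Nat.zero_add]
    have h0 : pvS g symbol 0 = 0 := by simp [pvS]
    rw [h0]
    ring_nf


lemma pv_foldA (g : List Char) (symbol : String) (m : Nat) (hm : 1 ≤ m) (hn : m ≤ g.length) :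
    (PySem.List.pyRange 1 ((m : Nat) : Int) 1).foldl (fun d i =>
      let d := d.insert i (d.getD (i - 1) 0)
      let d := if [PySem.List.pyGetD (g ++ g.take (g.length / 2)) (i - 1) ' '] == symbol.toList
               then d.insert i (d.getD i 0 - 1) else d
      let d := if [PySem.List.pyGetD (g ++ g.take (g.length / 2)) (i + ((g.length / 2 : Nat) : Int) - 1) ' '] == symbol.toList
               then d.insert i (d.getD i 0 + 1) else d
      d)
      (PySem.Dict.empty.insert 0 ((PySem.Chars.count (g.take (g.length / 2)) symbol.toList : Nat) : Int))
    = PySem.Dict.mk (pvL g symbol m) := by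
  induction m, hm using Nat.le_induction with
  | base =>
    rw [show ((1 : Nat) : Int) = (1 : Int) by norm_num, PySem.List.pyRange_one_eq_nil le_rfl]
    rw [List.foldl_nil]
    apply PySem.Dict.ext
    rw [PySem.Dict.items_insert_of_not_contains _ _ (by simp)]
    simp [pvL, pvV, pvS, PySem.Dict.empty]
  | succ m hm ih =>
    have hmn : m ≤ g.length := by omega
    have hcast : ((m + 1 : Nat) : Int) = ((m : Nat) : Int) + 1 := by push_cast; ring
    rw [hcast, PySem.List.pyRange_one_succ_right (by exact_mod_cast hm), List.foldl_append, ih hmn]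
    rw [List.foldl_cons, List.foldl_nil]
    have hext : g ++ g.take (g.length / 2) = pvExt g := rfl
    have ec1 : ((m : Nat) : Int) - 1 = ((m - 1 : Nat) : Int) := by omega
    have ec2 : ((m : Nat) : Int) + ((g.length / 2 : Nat) : Int) - 1 = ((m - 1 + g.length / 2 : Nat) : Int) := by omega
    simp only [hext, ec1, ec2, PySem.List.pyGetD_natCast]
    rw [pv_getD_L g symbol m (m - 1) (by omega)]
    have hV := pv_V_succ g symbol (m - 1) (by omega)
    rw [show m - 1 + 1 = m from by omega] at hV
    simp only [pvPred] at hV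
    split_ifs with h1 h2 h2
    case pos =>
      try simp only [PySem.Dict.getD_insert_self, PySem.Dict.insert_insert_self]
      rw [pv_mk_insert_fresh]
      congr 1
      rw [pvL, pvL, List.range_succ, List.map_append, List.map_singleton]
      congr 2
      rw [hV, if_pos h1, if_pos h2]
      try ring_nf
    case neg =>
      try simp only [PySem.Dict.getD_insert_self, PySem.Dict.insert_insert_self]
      rw [pv_mk_insert_fresh]
      congr 1
      rw [pvL, pvL, List.range_succ, List.map_append, List.map_singleton]
      congr 2
      rw [hV, if_pos h1, if_neg h2]
      try ring_nf
    case pos =>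
      try simp only [PySem.Dict.getD_insert_self, PySem.Dict.insert_insert_self]
      rw [pv_mk_insert_fresh]
      congr 1
      rw [pvL, pvL, List.range_succ, List.map_append, List.map_singleton]
      congr 2
      rw [hV, if_neg h1, if_pos h2]
      try ring_nf
    case neg =>
      try simp only [PySem.Dict.getD_insert_self, PySem.Dict.insert_insert_self]
      rw [pv_mk_insert_fresh]
      congr 1
      rw [pvL, pvL, List.range_succ, List.map_append, List.map_singleton]
      congr 2
      rw [hV, if_neg h1, if_neg h2]
      try ring_nf

-- ===== VERDICT (by name: the statement is the Claim_ definition above) =====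
theorem SymbolArray_spec : Claim_equal_SymbolArray := by
  intro Genome symbol _
  unfold Spec_SymbolArray SymbolArray SymbolArray_alt
  have hfd : PySem.Int.floordiv ((Genome.toList.length : Nat) : Int) 2
      = ((Genome.toList.length / 2 : Nat) : Int) := by
    exact_mod_cast PySem.Int.floordiv_natCast Genome.toList.length 2
  simp only [PySem.Str.len_eq, hfd, PySem.List.slice_zero_start, PySem.List.slice_to_natCast]
  by_cases h0 : Genome.toList.length = 0
  · rw [h0]
    norm_num [PySem.List.pyRange_one_eq_nil]
  · rw [pv_foldA Genome.toList symbol Genome.toList.length (by omega) le_rfl,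
        pv_foldB Genome.toList symbol Genome.toList.length (by omega) le_rfl]
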